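-- pv_equiv track=rewrite | github.com/iamkalio/traceflow | backend/modules/evaluation/domain/scoring.py | count_bucket_totals
-- ===== SOURCE A (Python) =====
-- def quality_bucket_from_eval_label(label: str | None) -> str | None:
--     """
--     Map eval label strings into coarse quality buckets for rollups (insights, groups).
--
--     Returns ``good`` | ``borderline`` | ``bad`` or None if unknown / empty.
--     """
--     if not label:
--         return None
--     l = label.lower()
--     if l == "grounded":
--         return "good"
--     if l == "partially_grounded":
--         return "borderline"
--     if l == "not_grounded":
--         return "bad"
--     if l == "improved":
--         return "good"
--     if l == "unchanged":
--         return "borderline"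
--     if l == "regressed":
--         return "bad"
--     return None
--
-- def count_bucket_totals(labels: list[str | None]) -> tuple[int, int, int]:
--     good = borderline = bad = 0
--     for lab in labels:
--         b = quality_bucket_from_eval_label(lab)
--         if b == "good":
--             good += 1
--         elif b == "borderline":
--             borderline += 1
--         elif b == "bad":
--             bad += 1
--     return good, borderline, bad
-- ===== SOURCE B (Python) =====
-- def count_bucket_totals(labels):
--     lowered = [lab.lower() for lab in labels if lab]
--     good = lowered.count("grounded") + lowered.count("improved")
--     borderline = lowered.count("partially_grounded") + lowered.count("unchanged")
--     bad = lowered.count("not_grounded") + lowered.count("regressed")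
--     return good, borderline, bad
-- ===== Notes on version B (the rewrite author's own statement) =====
-- stated objective: idiomatic
-- what changed: Replaces the per-element if/elif bucket classification with one lowercased falsy-filtered view of the input followed by six .count tallies combined arithmetically into the three totals.
import Mathlib
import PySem

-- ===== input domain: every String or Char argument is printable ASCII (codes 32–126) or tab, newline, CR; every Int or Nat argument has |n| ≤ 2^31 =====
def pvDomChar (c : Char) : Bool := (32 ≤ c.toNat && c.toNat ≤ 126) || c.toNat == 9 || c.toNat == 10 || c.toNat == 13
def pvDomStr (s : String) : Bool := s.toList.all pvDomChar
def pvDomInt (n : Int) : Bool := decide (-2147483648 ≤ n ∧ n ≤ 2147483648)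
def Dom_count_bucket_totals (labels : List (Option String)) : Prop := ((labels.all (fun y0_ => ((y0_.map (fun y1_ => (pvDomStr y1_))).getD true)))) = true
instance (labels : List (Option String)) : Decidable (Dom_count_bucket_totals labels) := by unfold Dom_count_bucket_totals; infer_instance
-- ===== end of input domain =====

-- B replaces A's per-element if/elif classification loop by one lowercased
-- filtered view plus six .count tallies combined into the three totals (idiomatic).

-- ===== PORT A =====
def quality_bucket_from_eval_label (label : Option String) : Option String :=
  match label with
  | none => none
  | some s =>
    if s = "" then none
    else
      let l := PySem.Str.lower s
      if l = "grounded" then some "good"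
      else if l = "partially_grounded" then some "borderline"
      else if l = "not_grounded" then some "bad"
      else if l = "improved" then some "good"
      else if l = "unchanged" then some "borderline"
      else if l = "regressed" then some "bad"
      else none

def pvStep (st : Int × Int × Int) (lab : Option String) : Int × Int × Int :=
  let b := quality_bucket_from_eval_label lab
  if b = some "good" then (st.1 + 1, st.2.1, st.2.2)
  else if b = some "borderline" then (st.1, st.2.1 + 1, st.2.2)
  else if b = some "bad" then (st.1, st.2.1, st.2.2 + 1)
  else st

def count_bucket_totals (labels : List (Option String)) : Int × Int × Int :=
  labels.foldl pvStep (0, 0, 0)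

-- ===== PORT B =====
def count_bucket_totals_alt (labels : List (Option String)) : Int × Int × Int :=
  let lowered := labels.filterMap (fun lab =>
    match lab with
    | none => none
    | some s => if s = "" then none else some (PySem.Str.lower s))
  ((PySem.List.count lowered "grounded" : Int) + (PySem.List.count lowered "improved" : Int),
   (PySem.List.count lowered "partially_grounded" : Int) + (PySem.List.count lowered "unchanged" : Int),
   (PySem.List.count lowered "not_grounded" : Int) + (PySem.List.count lowered "regressed" : Int))

-- ===== PRECONDITION & SPEC =====
def Spec_count_bucket_totals (labels : List (Option String)) (out : Int × Int × Int) : Prop := out = count_bucket_totals_alt labels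
instance (labels : List (Option String)) (out : Int × Int × Int) : Decidable (Spec_count_bucket_totals labels out) := by unfold Spec_count_bucket_totals; infer_instance

-- ===== CLAIM (what is proved, stated in full; the proofs are below) =====
def Claim_equal_count_bucket_totals : Prop := ∀ (labels : List (Option String)), Dom_count_bucket_totals labels → Spec_count_bucket_totals labels (count_bucket_totals labels)

-- ===== LEMMAS AND PROOFS =====

def pvLowered (labels : List (Option String)) : List String :=
  labels.filterMap (fun lab =>
    match lab with
    | none => none
    | some s => if s = "" then none else some (PySem.Str.lower s))

lemma count_bucket_totals_loop (labels : List (Option String)) (g bo ba : Int) :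
    labels.foldl pvStep (g, bo, ba)
    = (g + ((pvLowered labels).count "grounded" : Int) + ((pvLowered labels).count "improved" : Int),
       bo + ((pvLowered labels).count "partially_grounded" : Int) + ((pvLowered labels).count "unchanged" : Int),
       ba + ((pvLowered labels).count "not_grounded" : Int) + ((pvLowered labels).count "regressed" : Int)) := by
  induction labels generalizing g bo ba with
  | nil => simp [pvLowered]
  | cons lab rest ih =>
    rw [List.foldl_cons]
    match lab with
    | none =>
      have hstep : pvStep (g, bo, ba) none = (g, bo, ba) := by
        simp [pvStep, quality_bucket_from_eval_label]
      rw [hstep, ih]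
      simp [pvLowered]
    | some s =>
      by_cases hs : s = ""
      · have hstep : pvStep (g, bo, ba) (some s) = (g, bo, ba) := by
          simp [pvStep, quality_bucket_from_eval_label, hs]
        rw [hstep, ih]
        simp [pvLowered, hs]
      · have hlow : pvLowered (some s :: rest) = PySem.Str.lower s :: pvLowered rest := by
          simp [pvLowered, hs]
        have hstep : pvStep (g, bo, ba) (some s) =
            (if PySem.Str.lower s = "grounded" ∨ PySem.Str.lower s = "improved" then (g + 1, bo, ba)
             else if PySem.Str.lower s = "partially_grounded" ∨ PySem.Str.lower s = "unchanged" then (g, bo + 1, ba)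
             else if PySem.Str.lower s = "not_grounded" ∨ PySem.Str.lower s = "regressed" then (g, bo, ba + 1)
             else (g, bo, ba)) := by
          clear hlow ih
          simp only [pvStep, quality_bucket_from_eval_label, hs, if_false]
          generalize PySem.Str.lower s = l
          by_cases h1 : l = "grounded" <;> by_cases h2 : l = "partially_grounded" <;>
            by_cases h3 : l = "not_grounded" <;> by_cases h4 : l = "improved" <;>
            by_cases h5 : l = "unchanged" <;> by_cases h6 : l = "regressed" <;>
            simp_all
        rw [hstep, hlow]
        split_ifs with h1 h2 h3
        · rcases h1 with h | h <;> rw [ih] <;>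
            simp [h, Prod.ext_iff] <;> omega
        · rcases h2 with h | h <;> rw [ih] <;>
            simp [h, Prod.ext_iff] <;> omega
        · rcases h3 with h | h <;> rw [ih] <;>
            simp [h, Prod.ext_iff] <;> omega
        · push Not at h1 h2 h3
          rw [ih]
          simp [h1.1, h1.2, h2.1, h2.2, h3.1, h3.2]

-- ===== VERDICT (by name: the statement is the Claim_ definition above) =====
theorem count_bucket_totals_spec : Claim_equal_count_bucket_totals := by
  intro labels _
  unfold Spec_count_bucket_totals count_bucket_totals count_bucket_totals_alt
  rw [count_bucket_totals_loop]
  simp [pvLowered, PySem.List.count]
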